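-- pv_equiv track=rewrite | github.com/hrsi56/Machshevet | Machshevet.py | augment_action
-- ===== SOURCE A (Python) =====
-- def augment_action(action, rot: int = 0, flip: bool = False):
--     row, col, d = action
--     dirs = [(-2, 0), (2, 0), (0, -2), (0, 2)]
--     dr, dc = dirs[d]
--     tgt = (row + dr, col + dc)
--
--     for _ in range(rot):
--         row, col = col, 6 - row
--         tgt = (tgt[1], 6 - tgt[0])
--
--     if flip:
--         col, tgt = 6 - col, (tgt[0], 6 - tgt[1])
--
--     diff = (tgt[0] - row, tgt[1] - col)
--     return row, col, dirs.index(diff)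
-- ===== SOURCE B (Python) =====
-- # B: carry the direction as an index through rotation/flip permutations
-- # instead of tracking a target point and re-searching dirs at the end.
-- _ROT = [3, 2, 0, 1]   # direction index after one quarter turn (r,c)->(c,6-r)
-- _FLIP = [0, 1, 3, 2]  # direction index after mirroring col -> 6-col
--
-- def augment_action(action, rot: int = 0, flip: bool = False):
--     row, col, d = action
--     d %= 4  # same element dirs[d] selects for -4 <= d < 4
--     for _ in range(rot):
--         row, col = col, 6 - row
--         d = _ROT[d]
--     if flip:
--         col = 6 - col
--         d = _FLIP[d]
--     return row, col, d
-- ===== Notes on version B (the rewrite author's own statement) =====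
-- stated objective: simpler
-- what changed: B drops the target point entirely: it normalizes the direction to an index and maps it through precomputed rotation/flip permutations of direction indices, so there is no tgt tuple and no dirs.index search at the end.
import Mathlib
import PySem

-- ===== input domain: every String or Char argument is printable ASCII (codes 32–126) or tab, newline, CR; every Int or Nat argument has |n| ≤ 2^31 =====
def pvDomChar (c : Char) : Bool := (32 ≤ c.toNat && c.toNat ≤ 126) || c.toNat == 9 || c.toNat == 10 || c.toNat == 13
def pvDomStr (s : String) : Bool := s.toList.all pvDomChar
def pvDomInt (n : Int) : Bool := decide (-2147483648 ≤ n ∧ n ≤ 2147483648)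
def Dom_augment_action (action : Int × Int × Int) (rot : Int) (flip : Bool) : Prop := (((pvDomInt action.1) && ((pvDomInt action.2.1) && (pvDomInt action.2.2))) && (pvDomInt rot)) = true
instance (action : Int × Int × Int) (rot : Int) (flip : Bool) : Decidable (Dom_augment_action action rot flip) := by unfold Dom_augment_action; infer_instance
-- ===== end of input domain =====

-- B replaces A's tracked target point and final dirs.index search by mapping the
-- direction index through rotation/flip permutations (objective: simpler).

-- ===== PORT A =====
def pvDirs : List (Int × Int) := [(-2, 0), (2, 0), (0, -2), (0, 2)]

-- one iteration of A's loop on the state ((row, col), tgt)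
def pvStepA (s : (Int × Int) × Int × Int) : (Int × Int) × Int × Int :=
  ((s.1.2, 6 - s.1.1), (s.2.2, 6 - s.2.1))

def augment_action (action : Int × Int × Int) (rot : Int) (flip : Bool) : Int × Int × Int :=
  match action with
  | (row, col, d) =>
    match PySem.List.pyGet? pvDirs d with
    | none => (0, 0, 0)  -- dirs[d] IndexError: excluded by Pre_
    | some (dr, dc) =>
      let s := (PySem.List.pyRange 0 rot 1).foldl (fun s _ => pvStepA s)
        ((row, col), (row + dr, col + dc))
      let row := s.1.1
      let col := if flip then 6 - s.1.2 else s.1.2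
      let tgt := if flip then (s.2.1, 6 - s.2.2) else s.2
      let diff := (tgt.1 - row, tgt.2 - col)
      match PySem.List.index? pvDirs diff with
      | none => (0, 0, 0)  -- dirs.index ValueError: unreachable under Pre_
      | some i => (row, col, (i : Int))

-- ===== PORT B =====
def pvRotPerm : List Int := [3, 2, 0, 1]
def pvFlipPerm : List Int := [0, 1, 3, 2]

-- one iteration of B's loop on the state (row, col, d)
def pvStepB (s : Int × Int × Int) : Int × Int × Int :=
  (s.2.1, 6 - s.1, PySem.List.pyGetD pvRotPerm s.2.2 0)

def augment_action_alt (action : Int × Int × Int) (rot : Int) (flip : Bool) : Int × Int × Int :=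
  match action with
  | (row, col, d) =>
    let d := PySem.Int.mod d 4
    let s := (PySem.List.pyRange 0 rot 1).foldl (fun s _ => pvStepB s) (row, col, d)
    if flip then (s.1, 6 - s.2.1, PySem.List.pyGetD pvFlipPerm s.2.2 0) else s

-- ===== PRECONDITION & SPEC =====
-- Pre_ excludes only direction indices on which A's dirs[d] raises IndexError.
def Pre_augment_action (action : Int × Int × Int) (rot : Int) (flip : Bool) : Prop :=
  -4 ≤ action.2.2 ∧ action.2.2 < 4
instance (action : Int × Int × Int) (rot : Int) (flip : Bool) : Decidable (Pre_augment_action action rot flip) := by unfold Pre_augment_action; infer_instance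

def pvWitness_augment_action : (Int × Int × Int) × Int × Bool := ((1, 2, 3), 5, true)

def Spec_augment_action (action : Int × Int × Int) (rot : Int) (flip : Bool) (out : Int × Int × Int) : Prop := out = augment_action_alt action rot flip
instance (action : Int × Int × Int) (rot : Int) (flip : Bool) (out : Int × Int × Int) : Decidable (Spec_augment_action action rot flip out) := by unfold Spec_augment_action; infer_instance

-- ===== CLAIM (what is proved, stated in full; the proofs are below) =====
def Claim_equal_augment_action : Prop := ∀ (action : Int × Int × Int) (rot : Int) (flip : Bool), Dom_augment_action action rot flip → Pre_augment_action action rot flip → Spec_augment_action action rot flip (augment_action action rot flip)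


-- ===== LEMMAS AND PROOFS =====

-- invariant tying A's loop state ((row,col),tgt) to B's (row,col,d)
def pvInv (sa : (Int × Int) × Int × Int) (sb : Int × Int × Int) : Prop :=
  sa.1.1 = sb.1 ∧ sa.1.2 = sb.2.1 ∧
  ((sb.2.2 = 0 ∧ sa.2 = (sb.1 - 2, sb.2.1)) ∨
   (sb.2.2 = 1 ∧ sa.2 = (sb.1 + 2, sb.2.1)) ∨
   (sb.2.2 = 2 ∧ sa.2 = (sb.1, sb.2.1 - 2)) ∨
   (sb.2.2 = 3 ∧ sa.2 = (sb.1, sb.2.1 + 2)))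

theorem pvInv_step (sa : (Int × Int) × Int × Int) (sb : Int × Int × Int)
    (h : pvInv sa sb) : pvInv (pvStepA sa) (pvStepB sb) := by
  obtain ⟨⟨r, c⟩, t1, t2⟩ := sa
  obtain ⟨r', c', d⟩ := sb
  obtain ⟨h1, h2, h3⟩ := h
  simp only at h1 h2
  subst h1 h2
  rcases h3 with ⟨hd, ht⟩ | ⟨hd, ht⟩ | ⟨hd, ht⟩ | ⟨hd, ht⟩ <;>
    subst hd <;> simp_all [pvInv, pvStepA, pvStepB, pvRotPerm, PySem.List.pyGetD] <;> omega

theorem pvInv_foldl (l : List Int) (sa : (Int × Int) × Int × Int) (sb : Int × Int × Int)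
    (h : pvInv sa sb) :
    pvInv (l.foldl (fun s _ => pvStepA s) sa) (l.foldl (fun s _ => pvStepB s) sb) := by
  induction l generalizing sa sb with
  | nil => exact h
  | cons x xs ih => exact ih _ _ (pvInv_step _ _ h)

theorem pvTail (l : List Int) (flip : Bool) (sa0 : (Int × Int) × Int × Int)
    (sb0 : Int × Int × Int) (h : pvInv sa0 sb0) :
    (let s := l.foldl (fun s _ => pvStepA s) sa0
     let row := s.1.1
     let col := if flip then 6 - s.1.2 else s.1.2
     let tgt := if flip then (s.2.1, 6 - s.2.2) else s.2
     let diff := (tgt.1 - row, tgt.2 - col)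
     match PySem.List.index? pvDirs diff with
     | none => ((0 : Int), (0 : Int), (0 : Int))
     | some i => (row, col, (i : Int))) =
    (let s := l.foldl (fun s _ => pvStepB s) sb0
     if flip then (s.1, 6 - s.2.1, PySem.List.pyGetD pvFlipPerm s.2.2 0) else s) := by
  have hinv := pvInv_foldl l sa0 sb0 h
  generalize l.foldl (fun s _ => pvStepA s) sa0 = sa at hinv ⊢
  generalize l.foldl (fun s _ => pvStepB s) sb0 = sb at hinv ⊢
  obtain ⟨⟨r, c⟩, t1, t2⟩ := sa
  obtain ⟨r', c', dd⟩ := sb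
  obtain ⟨h1, h2, h3⟩ := hinv
  simp only at h1 h2
  subst h1 h2
  rcases h3 with ⟨hd, ht⟩ | ⟨hd, ht⟩ | ⟨hd, ht⟩ | ⟨hd, ht⟩ <;> subst hd <;>
    rw [Prod.mk.injEq] at ht <;> obtain ⟨ht1, ht2⟩ := ht <;> subst ht1 ht2 <;>
    cases flip <;>
    simp [pvDirs, pvFlipPerm, PySem.List.index?, PySem.List.pyGetD,
      show ∀ x : Int, x - 2 - x = -2 by intro x; ring,
      show ∀ x : Int, x + 2 - x = 2 by intro x; ring,
      show ∀ x : Int, x - (6 - (6 - x)) = 0 by intro x; ring,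
      show ∀ x : Int, x - 2 - (6 - (6 - x)) = -2 by intro x; ring,
      show ∀ x : Int, x + 2 - (6 - (6 - x)) = 2 by intro x; ring,
      show ∀ x : Int, 6 - (x - 2) - (6 - x) = 2 by intro x; ring,
      show ∀ x : Int, 6 - (x + 2) - (6 - x) = -2 by intro x; ring,
      show List.idxOf? ((-2 : Int), (0 : Int)) [((-2 : Int), (0 : Int)), (2, 0), (0, -2), (0, 2)] = some 0 from rfl,
      show List.idxOf? ((2 : Int), (0 : Int)) [((-2 : Int), (0 : Int)), (2, 0), (0, -2), (0, 2)] = some 1 from rfl,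
      show List.idxOf? ((0 : Int), (-2 : Int)) [((-2 : Int), (0 : Int)), (2, 0), (0, -2), (0, 2)] = some 2 from rfl,
      show List.idxOf? ((0 : Int), (2 : Int)) [((-2 : Int), (0 : Int)), (2, 0), (0, -2), (0, 2)] = some 3 from rfl]

theorem augment_action_spec : Claim_equal_augment_action := by
  intro action rot flip _ hpre
  obtain ⟨row, col, d⟩ := action
  obtain ⟨hd1, hd2⟩ := hpre
  simp only at hd1 hd2
  unfold Spec_augment_action augment_action augment_action_alt
  interval_cases d
  all_goals norm_num [pvDirs, PySem.List.pyGet?, PySem.List.pyIdx?, PySem.Int.mod, Int.emod, Int.tmod]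
  all_goals exact pvTail _ _ _ _ (by
    unfold pvInv
    refine ⟨rfl, rfl, ?_⟩
    norm_num [show ((-4 : Int)).fmod 4 = 0 from by decide,
      show ((-3 : Int)).fmod 4 = 1 from by decide,
      show ((-2 : Int)).fmod 4 = 2 from by decide,
      show ((-1 : Int)).fmod 4 = 3 from by decide,
      show ((0 : Int)).fmod 4 = 0 from by decide,
      show ((1 : Int)).fmod 4 = 1 from by decide,
      show ((2 : Int)).fmod 4 = 2 from by decide,
      show ((3 : Int)).fmod 4 = 3 from by decide,
      show Int.toNat 2 = 2 from by decide, show Int.toNat 3 = 3 from by decide,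
      List.getElem_cons_zero, List.getElem_cons_succ] <;> omega)
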